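-- pv_equiv track=rewrite | github.com/FRA503-DRL/RWARE-Project | rware_project/test_model.py | detect_collisions_from_obs
-- ===== SOURCE A (Python) =====
-- def detect_collisions_from_obs(obs_list):
--     positions = {}
--     collisions = [0] * len(obs_list)
--     for i, obs in enumerate(obs_list):
--         x, y = int(obs[0]), int(obs[1])
--         pos = (x, y)
--         if pos in positions:
--             collisions[i] = 1
--             collisions[positions[pos]] = 1
--         else:
--             positions[pos] = i
--     return collisions
-- ===== SOURCE B (Python) =====
-- def detect_collisions_from_obs(obs_list):
--     counts = {}
--     for obs in obs_list:
--         pos = (int(obs[0]), int(obs[1]))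
--         counts[pos] = counts.get(pos, 0) + 1
--     return [1 if counts[(int(obs[0]), int(obs[1]))] >= 2 else 0 for obs in obs_list]
-- ===== Notes on version B (the rewrite author's own statement) =====
-- stated objective: simpler
-- what changed: Replaces A's stateful first-index dict with in-place marking of earlier slots by a position counter built in one pass, then a direct comprehension emitting 1 for any position seen at least twice.
import Mathlib
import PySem

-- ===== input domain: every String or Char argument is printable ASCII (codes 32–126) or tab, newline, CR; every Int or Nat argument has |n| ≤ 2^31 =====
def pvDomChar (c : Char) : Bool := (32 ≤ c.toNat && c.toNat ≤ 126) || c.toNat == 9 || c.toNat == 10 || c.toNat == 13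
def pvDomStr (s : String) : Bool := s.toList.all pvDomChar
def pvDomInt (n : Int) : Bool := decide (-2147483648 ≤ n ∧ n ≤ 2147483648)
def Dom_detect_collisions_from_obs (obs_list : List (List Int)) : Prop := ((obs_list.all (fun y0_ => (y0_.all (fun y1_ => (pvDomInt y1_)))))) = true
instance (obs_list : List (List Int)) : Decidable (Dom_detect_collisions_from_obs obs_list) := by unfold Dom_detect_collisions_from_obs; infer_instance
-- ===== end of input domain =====

-- B replaces A's stateful first-index dict and in-place back-marking with a position counter built
-- in one pass followed by a direct map (simpler decomposition; same O(n) cost).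


-- position of one observation: (int(obs[0]), int(obs[1])); within Pre_ both indices exist
def pvPos (obs : List Int) : Int × Int :=
  ((PySem.List.pyGet? obs 0).getD 0, (PySem.List.pyGet? obs 1).getD 0)

-- ===== PORT A =====
def pvStepA (st : PySem.Dict (Int × Int) Int × List Int) (q : Int × List Int) :
    PySem.Dict (Int × Int) Int × List Int :=
  let pos := pvPos q.2
  match st.1.get? pos with
  | some j => (st.1, (st.2.set q.1.toNat 1).set j.toNat 1)
  | none   => (st.1.insert pos q.1, st.2)

def detect_collisions_from_obs (obs_list : List (List Int)) : List Int :=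
  ((PySem.List.enumerate obs_list 0).foldl pvStepA
    (PySem.Dict.empty, List.replicate obs_list.length 0)).2

-- ===== PORT B =====
def detect_collisions_from_obs_alt (obs_list : List (List Int)) : List Int :=
  let counts := obs_list.foldl
    (fun d obs => let pos := pvPos obs; d.insert pos (d.getD pos 0 + 1))
    (PySem.Dict.empty : PySem.Dict (Int × Int) Int)
  obs_list.map (fun obs => if 2 ≤ counts.getD (pvPos obs) 0 then (1 : Int) else 0)

-- ===== PRECONDITION & SPEC =====
-- Pre_ excludes exactly the inputs where Python A raises IndexError: an observation shorter than 2.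
def Pre_detect_collisions_from_obs (obs_list : List (List Int)) : Prop :=
  ∀ obs ∈ obs_list, 2 ≤ obs.length
instance (obs_list : List (List Int)) : Decidable (Pre_detect_collisions_from_obs obs_list) := by
  unfold Pre_detect_collisions_from_obs; infer_instance
def pvWitness_detect_collisions_from_obs : List (List Int) := [[0, 0], [1, 2, 5], [0, 0]]

def Spec_detect_collisions_from_obs (obs_list : List (List Int)) (out : List Int) : Prop :=
  out = detect_collisions_from_obs_alt obs_list
instance (obs_list : List (List Int)) (out : List Int) :
    Decidable (Spec_detect_collisions_from_obs obs_list out) := by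
  unfold Spec_detect_collisions_from_obs; infer_instance

-- ===== CLAIM (what is proved, stated in full; the proofs are below) =====
def Claim_equal_detect_collisions_from_obs : Prop :=
  ∀ (obs_list : List (List Int)), Dom_detect_collisions_from_obs obs_list →
    Pre_detect_collisions_from_obs obs_list →
    Spec_detect_collisions_from_obs obs_list (detect_collisions_from_obs obs_list)

-- ===== LEMMAS AND PROOFS =====

-- canonical result: mark every element whose value occurs at least twice
def pvMark (l : List (Int × Int)) : List Int :=
  l.map (fun p => if 2 ≤ l.count p then (1 : Int) else 0)

theorem pv_b_eq_mark (obs_list : List (List Int)) :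
    detect_collisions_from_obs_alt obs_list = pvMark (obs_list.map pvPos) := by
  have hc : (obs_list.foldl
      (fun d obs => d.insert (pvPos obs) (d.getD (pvPos obs) 0 + 1))
      (PySem.Dict.empty : PySem.Dict (Int × Int) Int)) = PySem.Dict.counter (obs_list.map pvPos) := by
    rw [← PySem.Dict.foldl_insert_getD_add_one_eq_counter,
        List.foldl_map (f := pvPos)
          (g := fun (d : PySem.Dict (Int × Int) Int) p => d.insert p (d.getD p 0 + 1))]
  simp only [detect_collisions_from_obs_alt, pvMark]
  simp only [hc, List.map_map]
  refine List.map_congr_left (fun obs _ => ?_)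
  simp only [Function.comp, PySem.Dict.getD_counter]
  by_cases h : 2 ≤ (obs_list.map pvPos).count (pvPos obs)
  · rw [if_pos h, if_pos (by exact_mod_cast h)]
  · rw [if_neg h, if_neg (by exact_mod_cast h)]

-- step over positions only
def pvStepP (st : PySem.Dict (Int × Int) Int × List Int) (q : Int × (Int × Int)) :
    PySem.Dict (Int × Int) Int × List Int :=
  match st.1.get? q.2 with
  | some j => (st.1, (st.2.set q.1.toNat 1).set j.toNat 1)
  | none   => (st.1.insert q.2 q.1, st.2)

theorem pv_foldA_eq_foldP (obs_list : List (List Int)) (s : Int) (st) :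
    (PySem.List.enumerate obs_list s).foldl pvStepA st
      = (PySem.List.enumerate (obs_list.map pvPos) s).foldl pvStepP st := by
  induction obs_list generalizing s st with
  | nil => simp [PySem.List.enumerate_nil]
  | cons x xs ih =>
      simp only [List.map_cons, PySem.List.enumerate_cons, List.foldl_cons]
      rw [ih]
      rfl

-- two distinct indices holding the same value force count ≥ 2
theorem pv_two_le_count_aux (l : List (Int × Int)) (p : Int × Int) (i j : Nat)
    (hij : i < j) (hj : j < l.length)
    (hvi : l[i]'(by omega) = p) (hvj : l[j] = p) : 2 ≤ l.count p := by
  have hd : j - (i+1) < (l.drop (i+1)).length := by simp; omega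
  have he : i + 1 + (j - (i+1)) < l.length := by omega
  have h1 : p ∈ l.take (i+1) :=
    List.mem_iff_getElem.mpr ⟨i, by simp; omega, by rw [List.getElem_take]; exact hvi⟩
  have e2 : l[i + 1 + (j - (i+1))]'he = l[j] := by congr 1; omega
  have h2 : p ∈ l.drop (i+1) :=
    List.mem_iff_getElem.mpr ⟨j - (i+1), hd, (List.getElem_drop).trans (e2.trans hvj)⟩
  calc 2 = 1 + 1 := rfl
    _ ≤ (l.take (i+1)).count p + (l.drop (i+1)).count p :=
        Nat.add_le_add (List.count_pos_iff.mpr h1) (List.count_pos_iff.mpr h2)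
    _ = l.count p := by rw [← List.count_append, List.take_append_drop]

theorem pv_two_le_count (l : List (Int × Int)) (p : Int × Int) (i j : Nat)
    (hi : i < l.length) (hj : j < l.length) (hne : i ≠ j)
    (hvi : l[i] = p) (hvj : l[j] = p) : 2 ≤ l.count p := by
  rcases Nat.lt_or_ge i j with hlt | hge
  · exact pv_two_le_count_aux l p i j hlt hj hvi hvj
  · exact pv_two_le_count_aux l p j i (by omega) hi hvj hvi

-- appending a fresh position appends an unmarked slot and marks nothing
theorem pv_mark_fresh (done : List (Int × Int)) (p : Int × Int) (h : p ∉ done) :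
    pvMark (done ++ [p]) = pvMark done ++ [(0 : Int)] := by
  unfold pvMark
  rw [List.map_append]
  congr 1
  · refine List.map_congr_left (fun q hq => ?_)
    have hne : q ≠ p := fun he => h (he ▸ hq)
    simp [List.count_append, Ne.symm hne]
  · have hc : done.count p = 0 := List.count_eq_zero.mpr h
    simp [List.count_append, hc]

-- appending a repeated position marks it and its first occurrence
theorem pv_mark_set (done : List (Int × Int)) (p : Int × Int) (j m : Nat)
    (h : List.idxOf? p done = some j) :
    ((pvMark done ++ List.replicate (m+1) (0 : Int)).set done.length 1).set j 1
      = pvMark (done ++ [p]) ++ List.replicate m 0 := by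
  obtain ⟨hj, hval, hmin⟩ := List.idxOf?_eq_some_iff.mp h
  have hmem : p ∈ done := hval ▸ List.getElem_mem hj
  have hcnt : 0 < done.count p := List.count_pos_iff.mpr hmem
  apply List.ext_getElem
  · simp [pvMark]
  · intro i h1 h2
    have hlen : i < done.length + (m + 1) := by simpa [pvMark] using h1
    simp only [List.getElem_set, List.getElem_append, pvMark, List.length_map,
      List.length_append, List.getElem_map, List.getElem_replicate, List.length_singleton]
    by_cases hij : j = i
    · subst hij
      rw [if_pos rfl, dif_pos (by omega), dif_pos hj, hval]
      have hc : 2 ≤ List.count p (done ++ [p]) := by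
        rw [List.count_append]; simp; omega
      rw [if_pos hc]
    · rw [if_neg hij]
      by_cases hdl : done.length = i
      · subst hdl
        rw [if_pos rfl, dif_pos (by omega), dif_neg (by omega)]
        have hp : [p][done.length - done.length] = p := by simp
        rw [hp]
        have hc : 2 ≤ List.count p (done ++ [p]) := by
          rw [List.count_append]; simp; omega
        rw [if_pos hc]
      · rw [if_neg hdl]
        by_cases hi : i < done.length
        · rw [dif_pos hi, dif_pos (by omega), dif_pos hi]
          by_cases hqp : done[i] = p
          · have h2c : 2 ≤ List.count done[i] done := by
              rw [hqp]
              exact pv_two_le_count done p i j hi hj (fun he => hij he.symm) hqp hval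
            have h2c' : 2 ≤ List.count done[i] (done ++ [p]) := by
              rw [List.count_append]; omega
            rw [if_pos h2c, if_pos h2c']
          · have hz : List.count done[i] [p] = 0 :=
              List.count_eq_zero.mpr (by simp [hqp])
            have hce : List.count done[i] (done ++ [p]) = List.count done[i] done := by
              rw [List.count_append, hz]; omega
            rw [hce]
        · rw [dif_neg hi, dif_neg (by omega)]

-- append-singleton laws for idxOf?
theorem pv_idx_append_some (l : List (Int × Int)) (p q : Int × Int) (k : Nat)
    (hq : List.idxOf? q l = some k) : List.idxOf? q (l ++ [p]) = some k := by
  obtain ⟨hk, hval, hmin⟩ := List.idxOf?_eq_some_iff.mp hq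
  refine List.idxOf?_eq_some_iff.mpr ⟨by simp; omega, ?_, ?_⟩
  · rw [List.getElem_append, dif_pos hk]; exact hval
  · intro t ht
    rw [List.getElem_append, dif_pos (by omega)]
    exact hmin t ht

theorem pv_idx_append_self (l : List (Int × Int)) (p : Int × Int) (h : p ∉ l) :
    List.idxOf? p (l ++ [p]) = some l.length := by
  refine List.idxOf?_eq_some_iff.mpr ⟨by simp, ?_, ?_⟩
  · rw [List.getElem_append, dif_neg (by omega)]; simp
  · intro k hk
    rw [List.getElem_append, dif_pos hk]
    exact fun he => h (he ▸ List.getElem_mem hk)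

theorem pv_idx_append_ne (l : List (Int × Int)) (p q : Int × Int) (hq : q ∉ l) (hne : q ≠ p) :
    List.idxOf? q (l ++ [p]) = none := by
  refine List.idxOf?_eq_none_iff.mpr ?_
  simp [hq, hne]

theorem pv_invariant (rest done : List (Int × Int))
    (positions : PySem.Dict (Int × Int) Int) (collisions : List Int)
    (H1 : ∀ p, positions.get? p = Option.map Int.ofNat (List.idxOf? p done))
    (H2 : collisions = pvMark done ++ List.replicate rest.length 0) :
    ((PySem.List.enumerate rest (done.length : Int)).foldl pvStepP (positions, collisions)).2
      = pvMark (done ++ rest) := by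
  induction rest generalizing done positions collisions with
  | nil => simp [PySem.List.enumerate_nil, H2, pvMark]
  | cons p rest' ih =>
      rw [PySem.List.enumerate_cons, List.foldl_cons]
      have hstep : pvStepP (positions, collisions) ((done.length : Int), p)
          = match Option.map Int.ofNat (List.idxOf? p done) with
            | some j => (positions, (collisions.set (done.length : Int).toNat 1).set j.toNat 1)
            | none => (positions.insert p (done.length : Int), collisions) := by
        unfold pvStepP
        rw [H1 p]
      rcases hidx : List.idxOf? p done with _ | j
      · -- fresh position
        rw [hstep, hidx]
        have hmem : p ∉ done := List.idxOf?_eq_none_iff.mp hidx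
        have hrec := ih (done ++ [p]) (positions.insert p (done.length : Int)) collisions
          (fun q => by
            rw [PySem.Dict.get?_insert]
            by_cases hqp : q = p
            · subst hqp
              rw [if_pos rfl, pv_idx_append_self done q hmem]
              rfl
            · rw [if_neg hqp, H1 q]
              rcases hql : List.idxOf? q done with _ | k
              · rw [pv_idx_append_ne done p q (List.idxOf?_eq_none_iff.mp hql) hqp]
              · rw [pv_idx_append_some done p q k hql])
          (by
            rw [H2, pv_mark_fresh done p hmem]
            simp [List.replicate_succ])
        have hlen : ((done ++ [p]).length : Int) = (done.length : Int) + 1 := by simp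
        rw [← hlen]
        show (List.foldl pvStepP (positions.insert p (done.length : Int), collisions)
            (PySem.List.enumerate rest' (((done ++ [p]).length : Nat) : Int))).2
          = pvMark (done ++ p :: rest')
        rw [hrec, List.append_assoc]
        rfl
      · -- repeated position
        rw [hstep, hidx]
        have hmem : p ∈ done := by
          obtain ⟨hj, hval, _⟩ := List.idxOf?_eq_some_iff.mp hidx
          exact hval ▸ List.getElem_mem hj
        have hrec := ih (done ++ [p]) positions
          ((collisions.set (done.length : Int).toNat 1).set (Int.ofNat j).toNat 1)
          (fun q => by
            rw [H1 q]
            rcases hql : List.idxOf? q done with _ | k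
            · have hq' : q ∉ done := List.idxOf?_eq_none_iff.mp hql
              have hqp : q ≠ p := fun he => hq' (he ▸ hmem)
              rw [pv_idx_append_ne done p q hq' hqp]
            · rw [pv_idx_append_some done p q k hql])
          (by
            rw [H2]
            have hn : (Int.ofNat j).toNat = j := rfl
            have hm : ((done.length : Int)).toNat = done.length := Int.toNat_natCast done.length
            rw [hn, hm, List.length_cons]
            exact pv_mark_set done p j rest'.length hidx)
        have hlen : ((done ++ [p]).length : Int) = (done.length : Int) + 1 := by simp
        rw [← hlen]
        show (List.foldl pvStepP
            (positions, (collisions.set ((done.length : Int)).toNat 1).set (Int.ofNat j).toNat 1)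
            (PySem.List.enumerate rest' (((done ++ [p]).length : Nat) : Int))).2
          = pvMark (done ++ p :: rest')
        rw [hrec, List.append_assoc]
        rfl

theorem pv_a_eq_mark (obs_list : List (List Int)) :
    detect_collisions_from_obs obs_list = pvMark (obs_list.map pvPos) := by
  have h := pv_invariant (obs_list.map pvPos) [] PySem.Dict.empty
    (List.replicate obs_list.length 0) (fun q => by simp [List.idxOf?_nil]) (by simp [pvMark])
  simpa [detect_collisions_from_obs, pv_foldA_eq_foldP] using h

-- ===== VERDICT (by name: the statement is the Claim_ definition above) =====
theorem detect_collisions_from_obs_spec : Claim_equal_detect_collisions_from_obs := by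
  intro obs_list _ _
  unfold Spec_detect_collisions_from_obs
  rw [pv_a_eq_mark, pv_b_eq_mark]
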